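-- pv_equiv track=rewrite | github.com/arsheed2000/Algo-Project | main.py | dict_to_matrix
-- ===== SOURCE A (Python) =====
-- def dict_to_matrix(dict_input):
--     result_matrix = []
--     num_keys = len(dict_input)
--     key_list = list(dict_input.keys())
--     for i in key_list:
--         result_matrix.append([])
--
--     for j in range(num_keys):
--         current_dict = dict_input[key_list[j]]
--         nested_key_list = list(current_dict.keys())
--         if len(nested_key_list) > len(key_list):
--             #For usage of graphs
--             raise ValueError("There are more values in inner dict than in outer dict")
--
--         for key in key_list:
--             if key in nested_key_list:
--                 outer_key = key_list[j]
--                 result_matrix[j].append(dict_input[outer_key][key])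
--             else:
--                 result_matrix[j].append(999)
--
--     return(result_matrix)
-- ===== SOURCE B (Python) =====
-- def dict_to_matrix(dict_input):
--     keys = list(dict_input)
--     n = len(keys)
--     key_index = {k: i for i, k in enumerate(keys)}
--     matrix = []
--     for inner in dict_input.values():
--         if len(inner) > n:
--             #For usage of graphs
--             raise ValueError("There are more values in inner dict than in outer dict")
--         row = [999] * n
--         for k, v in inner.items():
--             j = key_index.get(k)
--             if j is not None:
--                 row[j] = v
--         matrix.append(row)
--     return matrix
-- ===== Notes on version B (the rewrite author's own statement) =====
-- stated objective: faster
-- what changed: Replaces the dense per-row scan over all outer keys with an n-times-in-list membership test by a precomputed key->column index dict, a row prefilled with 999, and one sparse placement pass over each inner dict's items; intended as faster, measured ~4-5x at n=1024..4096 (a constant-factor change: the n x n output keeps both quadratic in n). Pre_ additionally excludes inputs where some inner dict has more entries than the outer dict (A and B raise ValueError there) and association lists with duplicate keys, which cannot arise from a Python dict.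
-- outside the precondition, e.g. on dict_to_matrix({'a': {'a': 1, 'b': 2}}): A raises ValueError, B raises ValueError
import Mathlib
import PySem

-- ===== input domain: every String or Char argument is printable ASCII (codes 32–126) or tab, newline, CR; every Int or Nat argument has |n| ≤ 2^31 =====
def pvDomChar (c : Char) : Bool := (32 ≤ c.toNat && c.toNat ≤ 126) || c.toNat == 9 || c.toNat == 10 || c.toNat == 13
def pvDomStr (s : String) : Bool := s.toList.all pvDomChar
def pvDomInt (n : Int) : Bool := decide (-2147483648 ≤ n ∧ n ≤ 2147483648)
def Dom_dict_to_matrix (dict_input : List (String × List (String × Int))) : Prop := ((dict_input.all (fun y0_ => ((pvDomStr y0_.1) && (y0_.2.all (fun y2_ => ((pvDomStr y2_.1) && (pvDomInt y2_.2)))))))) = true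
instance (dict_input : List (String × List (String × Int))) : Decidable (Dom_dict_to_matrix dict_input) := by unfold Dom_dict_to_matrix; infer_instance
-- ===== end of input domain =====

-- B replaces A's dense per-cell membership scan by a key->column index table and one sparse placement pass per row.

-- ===== PORT A =====
-- dict lookup d[k]: first match (Python dicts have unique keys; the default is never reached inside Pre_)
def pyDictVal {ν : Type} (d : List (String × ν)) (k : String) (dflt : ν) : ν :=
  ((d.find? (fun p => p.1 == k)).map (·.2)).getD dflt

def dict_to_matrix (dict_input : List (String × List (String × Int))) : List (List Int) :=
  let num_keys : Int := dict_input.length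
  let key_list : List String := dict_input.map (·.1)
  let result_matrix : List (List Int) := key_list.foldl (fun m _ => m ++ [([] : List Int)]) []
  (PySem.List.pyRange 0 num_keys 1).foldl (fun m j =>
    let current_dict := pyDictVal dict_input (PySem.List.pyGetD key_list j "") []
    let nested_key_list := current_dict.map (·.1)
    -- Python raises ValueError when nested_key_list.length > key_list.length; such inputs are outside Pre_
    key_list.foldl (fun m' key =>
      if key ∈ nested_key_list then
        m'.set j.toNat ((m'.getD j.toNat []) ++ [pyDictVal (pyDictVal dict_input (PySem.List.pyGetD key_list j "") []) key 0])
      else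
        m'.set j.toNat ((m'.getD j.toNat []) ++ [999])) m) result_matrix

-- ===== PORT B =====
def dict_to_matrix_alt (dict_input : List (String × List (String × Int))) : List (List Int) :=
  let keys : List String := dict_input.map (·.1)
  let n : Nat := keys.length
  let key_index : PySem.Dict String Int :=
    (PySem.List.enumerate keys 0).foldl (fun d p => d.insert p.2 p.1) PySem.Dict.empty
  -- Python raises ValueError when some inner dict is larger than n; such inputs are outside Pre_
  dict_input.map (fun pr =>
    pr.2.foldl (fun row kv =>
      match key_index.get? kv.1 with
      | some j => row.set j.toNat kv.2
      | none => row) (List.replicate n (999 : Int)))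

-- ===== PRECONDITION & SPEC =====
-- Pre_ excludes (a) inputs where some inner dict has more entries than the outer dict: Python A (and B) raise
-- ValueError there; and (b) association lists with duplicate keys (outer or inner), which cannot arise from a
-- Python dict — on such lists the two ports' first/last-match conventions are both accidental.
def Pre_dict_to_matrix (dict_input : List (String × List (String × Int))) : Prop :=
  (dict_input.map (·.1)).Nodup ∧
  ∀ p ∈ dict_input, (p.2.map (·.1)).Nodup ∧ p.2.length ≤ dict_input.length
instance (dict_input : List (String × List (String × Int))) : Decidable (Pre_dict_to_matrix dict_input) := by unfold Pre_dict_to_matrix; infer_instance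

def pvWitness_dict_to_matrix : (List (String × List (String × Int))) :=
  [("a", [("b", 1)]), ("b", [])]

def Spec_dict_to_matrix (dict_input : List (String × List (String × Int))) (out : List (List Int)) : Prop := out = dict_to_matrix_alt dict_input
instance (dict_input : List (String × List (String × Int))) (out : List (List Int)) : Decidable (Spec_dict_to_matrix dict_input out) := by unfold Spec_dict_to_matrix; infer_instance

-- ===== CLAIM (what is proved, stated in full; the proofs are below) =====
def Claim_equal_dict_to_matrix : Prop := ∀ (dict_input : List (String × List (String × Int))), Dom_dict_to_matrix dict_input → Pre_dict_to_matrix dict_input → Spec_dict_to_matrix dict_input (dict_to_matrix dict_input)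

-- ===== LEMMAS AND PROOFS =====

-- canonical value both ports are reduced to
def canonRow (keys : List String) (inner : List (String × Int)) : List Int :=
  keys.map (fun k => (((inner.find? (fun p => p.1 == k)).map (·.2)).getD 999))

-- ---------- B side ----------

-- first-match get? over a literal dict built from enumerate pairs
theorem get?_mk_enum (keys : List String) : ∀ (s : Int) (k : String),
    (PySem.Dict.mk ((PySem.List.enumerate keys s).map (fun p => (p.2, p.1)))).get? k
    = if k ∈ keys then some (s + (keys.idxOf k : Int)) else none := by
  induction keys with
  | nil => intro s k; simp [PySem.List.enumerate_nil, PySem.Dict.get?]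
  | cons x xs ih =>
    intro s k
    rw [PySem.List.enumerate_cons]
    simp only [List.map_cons, PySem.Dict.get?_mk_cons]
    by_cases hk : x = k
    · subst hk; simp [List.idxOf_cons_self]
    · simp only [beq_iff_eq, hk, if_false, ih (s+1) k, List.mem_cons]
      have hne : k ≠ x := fun h => hk h.symm
      simp only [hne, false_or]
      split_ifs with h
      · rw [List.idxOf_cons_ne _ (by simpa using hk)]
        push_cast; ring_nf
      · rfl

theorem keyIndex_get? (keys : List String) (hnd : keys.Nodup) (k : String) :
    ((PySem.List.enumerate keys 0).foldl (fun d p => d.insert p.2 p.1) PySem.Dict.empty).get? k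
    = if k ∈ keys then some ((keys.idxOf k : Int)) else none := by
  have hitems : ((PySem.List.enumerate keys 0).foldl (fun d p => d.insert p.2 p.1) PySem.Dict.empty).items
      = (PySem.List.enumerate keys 0).map (fun p => (p.2, p.1)) := by
    have := PySem.Dict.items_foldl_insert_fresh (l := PySem.List.enumerate keys 0)
      (k := fun p => p.2) (v := fun p => p.1) (d := PySem.Dict.empty)
      (by intro a _; rfl)
      (by rw [PySem.List.map_snd_enumerate]; exact hnd)
    simpa using this
  have hd : ((PySem.List.enumerate keys 0).foldl (fun d p => d.insert p.2 p.1) PySem.Dict.empty)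
      = PySem.Dict.mk ((PySem.List.enumerate keys 0).map (fun p => (p.2, p.1))) := by
    apply PySem.Dict.ext; simpa using hitems
  rw [hd, get?_mk_enum]
  simp

theorem foldB_length (ki : PySem.Dict String Int) :
    ∀ (inner : List (String × Int)) (row : List Int),
    (inner.foldl (fun row kv => match ki.get? kv.1 with
      | some j => row.set j.toNat kv.2 | none => row) row).length = row.length := by
  intro inner
  induction inner with
  | nil => intro row; rfl
  | cons kv rest ih =>
    intro row
    simp only [List.foldl_cons]
    cases ki.get? kv.1 with
    | none => exact ih row
    | some j => rw [ih]; simp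

theorem foldB_getElem (keys : List String) (hnd : keys.Nodup)
    (ki : PySem.Dict String Int)
    (hki : ∀ k, ki.get? k = if k ∈ keys then some ((keys.idxOf k : Int)) else none) :
    ∀ (inner : List (String × Int)), (inner.map (·.1)).Nodup →
    ∀ (row : List Int), row.length = keys.length →
    ∀ i (h : i < keys.length),
    (inner.foldl (fun row kv => match ki.get? kv.1 with
      | some j => row.set j.toNat kv.2 | none => row) row)[i]?
    = match inner.find? (fun p => p.1 == keys[i]) with
      | some p => some p.2
      | none => row[i]? := by
  intro inner
  induction inner with
  | nil => intro _ row _ i h; simp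
  | cons kv rest ih =>
    intro hinnd row hlen i h
    simp only [List.map_cons, List.nodup_cons] at hinnd
    obtain ⟨hkv, hrestnd⟩ := hinnd
    simp only [List.foldl_cons, List.find?_cons]
    by_cases heq : kv.1 = keys[i]
    · -- head matches: rest cannot match again (nodup), the write lands at position i
      have hmem : kv.1 ∈ keys := heq ▸ List.getElem_mem h
      have hrest_none : rest.find? (fun p => p.1 == keys[i]) = none := by
        apply List.find?_eq_none.mpr
        intro p hp hbeq
        exact hkv (List.mem_map.mpr ⟨p, hp, by rw [heq]; simpa using hbeq⟩)
      have hidx : keys.idxOf kv.1 = i := by rw [heq]; exact hnd.idxOf_getElem i h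
      rw [hki kv.1]
      simp only [hmem, if_true]
      rw [ih hrestnd _ (by simp [hlen]) i h, hrest_none]
      simp only [hidx, Int.toNat_natCast]
      rw [List.getElem?_set_self (by omega)]
      simp [heq]
    · -- head does not match: the write (if any) is at a different position
      rw [hki kv.1]
      by_cases hmem : kv.1 ∈ keys
      · simp only [hmem, if_true]
        rw [ih hrestnd _ (by simp [hlen]) i h]
        have hne : keys.idxOf kv.1 ≠ i := by
          intro hcontra
          have h2 := List.getElem_idxOf (x := kv.1) (xs := keys) (by omega)
          simp only [hcontra] at h2
          exact heq h2.symm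
        simp only [Int.toNat_natCast]
        rw [List.getElem?_set_ne hne,
          show (kv.1 == keys[i]) = false by simpa using heq]
      · simp only [hmem, if_false]
        rw [ih hrestnd _ hlen i h,
          show (kv.1 == keys[i]) = false by simpa using heq]

theorem canon_B (dict_input : List (String × List (String × Int)))
    (hnd : (dict_input.map (·.1)).Nodup)
    (hin : ∀ p ∈ dict_input, (p.2.map (·.1)).Nodup) :
    dict_to_matrix_alt dict_input
    = dict_input.map (fun pr => canonRow (dict_input.map (·.1)) pr.2) := by
  simp only [dict_to_matrix_alt]
  set keys := dict_input.map (·.1) with hkeys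
  apply List.map_congr_left
  intro pr hpr
  apply List.ext_getElem?
  intro i
  by_cases h : i < keys.length
  · rw [foldB_getElem keys hnd _ (keyIndex_get? keys hnd) pr.2 (hin pr hpr)
        (List.replicate keys.length 999) (by simp) i h]
    rw [List.getElem?_replicate_of_lt h]
    unfold canonRow
    rw [List.getElem?_map, List.getElem?_eq_getElem h]
    cases hf : pr.2.find? (fun p => p.1 == keys[i]) <;> simp [hf]
  · have h1 : (pr.2.foldl (fun row kv =>
        match ((PySem.List.enumerate keys 0).foldl (fun d p => d.insert p.2 p.1) PySem.Dict.empty).get? kv.1 with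
        | some j => row.set j.toNat kv.2
        | none => row) (List.replicate keys.length (999 : Int))).length = keys.length := by
      rw [foldB_length]; simp
    rw [List.getElem?_eq_none (by omega), List.getElem?_eq_none (by unfold canonRow; simp; omega)]

-- ---------- A side ----------

-- with distinct keys, the first match for the k-th key is the k-th entry
theorem find_fst_nodup {α : Type} : ∀ (di : List (String × α)), (di.map (·.1)).Nodup →
    ∀ (k : Nat) (h : k < di.length), di.find? (fun p => p.1 == di[k].1) = some di[k] := by
  intro di
  induction di with
  | nil => intro _ k h; simp at h
  | cons hd tl ih =>
    intro hnd k h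
    simp only [List.map_cons, List.nodup_cons] at hnd
    obtain ⟨hhd, htl⟩ := hnd
    cases k with
    | zero => simp
    | succ k =>
      have hk : k < tl.length := by simpa using h
      have hne : (hd.1 == tl[k].1) = false := by
        apply beq_eq_false_iff_ne.mpr
        intro hcontra
        exact hhd (hcontra ▸ List.mem_map.mpr ⟨tl[k], List.getElem_mem hk, rfl⟩)
      simp only [List.getElem_cons_succ, List.find?_cons, hne]
      exact ih htl k hk

-- membership-guarded lookup agrees with the find?-with-default form
theorem row_entry (inner : List (String × Int)) (key : String) :
    (if key ∈ inner.map (·.1) then pyDictVal inner key 0 else 999)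
    = ((inner.find? (fun p => p.1 == key)).map (·.2)).getD 999 := by
  by_cases hmem : key ∈ inner.map (·.1)
  · cases hf : inner.find? (fun p => p.1 == key) with
    | some p => simp [hmem, pyDictVal, hf]
    | none =>
      exfalso
      obtain ⟨p, hp, hpk⟩ := List.mem_map.mp hmem
      exact absurd (List.find?_eq_none.mp hf p hp) (by simp [hpk])
  · have hf : inner.find? (fun p => p.1 == key) = none := by
      apply List.find?_eq_none.mpr
      intro p hp hbeq
      exact hmem (List.mem_map.mpr ⟨p, hp, by simpa using hbeq⟩)
    simp [hmem, hf]

-- the row-initialisation loop builds a list of empty rows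
theorem init_rows (l : List String) : ∀ (init : List (List Int)),
    l.foldl (fun m _ => m ++ [([] : List Int)]) init = init ++ List.replicate l.length [] := by
  induction l with
  | nil => intro init; simp
  | cons x xs ih =>
    intro init
    simp only [List.foldl_cons, ih, List.length_cons, List.replicate_succ]
    simp [List.append_assoc]

-- the inner per-cell append loop writes the whole mapped row at position t at once
theorem inner_fold (g : String → Int) (t : Nat) : ∀ (ks : List String) (m : List (List Int)),
    t < m.length →
    ks.foldl (fun m' key => m'.set t ((m'.getD t []) ++ [g key])) m
    = m.set t ((m.getD t []) ++ ks.map g) := by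
  intro ks
  induction ks with
  | nil => intro m ht; simp [List.set_getElem_self, List.getD_eq_getElem?_getD, List.getElem?_eq_getElem ht]
  | cons k ks ih =>
    intro m ht
    simp only [List.foldl_cons]
    rw [ih _ (by simpa using ht), List.set_set]
    congr 1
    rw [List.getD_eq_getElem?_getD, List.getElem?_set_self ht, List.getD_eq_getElem?_getD]
    simp [List.append_assoc]

theorem outer_len (step : List (List Int) → Nat → List (List Int))
    (hstep : ∀ m j, (step m j).length = m.length) :
    ∀ (l : List Nat) (m : List (List Int)), (l.foldl step m).length = m.length := by
  intro l
  induction l with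
  | nil => intro m; rfl
  | cons j l ih => intro m; rw [List.foldl_cons, ih, hstep]

-- the outer loop sets each position exactly once, reading it before any write
theorem outer_point (R : Nat → List Int) :
    ∀ (n : Nat) (m : List (List Int)) (i : Nat),
    ((List.range n).foldl (fun m' j => m'.set j ((m'.getD j []) ++ R j)) m)[i]?
    = if i < n then (m[i]?).map (· ++ R i) else m[i]? := by
  intro n
  induction n with
  | zero => intro m i; simp
  | succ n ih =>
    intro m i
    rw [List.range_succ, List.foldl_append]
    simp only [List.foldl_cons, List.foldl_nil]
    set Y := (List.range n).foldl (fun m' j => m'.set j ((m'.getD j []) ++ R j)) m with hY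
    have hYlen : Y.length = m.length := by
      apply outer_len; intro m' j; simp
    by_cases hin : i < n
    · have hne : n ≠ i := by omega
      rw [List.getElem?_set_ne hne, ih, if_pos hin, if_pos (by omega)]
    · by_cases hieq : i = n
      · subst hieq
        by_cases hlt : i < m.length
        · rw [List.getElem?_set_self (by omega), if_pos (by omega)]
          rw [List.getD_eq_getElem?_getD, ih, if_neg (by omega)]
          rw [List.getElem?_eq_getElem hlt]
          simp
        · rw [List.set_eq_of_length_le (by omega), ih, if_neg (by omega), if_pos (by omega),
            List.getElem?_eq_none (by omega)]
          rfl
      · rw [List.getElem?_set_ne (fun h => hieq h.symm), ih, if_neg hin, if_neg (by omega)]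

theorem inner_fold' (c : String → Prop) [DecidablePred c] (v : String → Int) (t : Nat) (ks : List String)
    (m : List (List Int)) (ht : t < m.length) :
    ks.foldl (fun m' key => if c key then m'.set t ((m'.getD t []) ++ [v key])
      else m'.set t ((m'.getD t []) ++ [999])) m
    = m.set t ((m.getD t []) ++ ks.map (fun key => if c key then v key else 999)) := by
  have hfun : (fun (m' : List (List Int)) key => if c key then m'.set t ((m'.getD t []) ++ [v key])
      else m'.set t ((m'.getD t []) ++ [999]))
      = (fun m' key => m'.set t ((m'.getD t []) ++ [if c key then v key else 999])) := by
    funext m' key; split_ifs <;> rfl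
  rw [hfun, inner_fold _ t ks m ht]

theorem foldl_preserve_len {β : Type} (f : List (List Int) → β → List (List Int))
    (h : ∀ m b, (f m b).length = m.length) :
    ∀ (l : List β) (m : List (List Int)), (l.foldl f m).length = m.length := by
  intro l
  induction l with
  | nil => intro m; rfl
  | cons b l ih => intro m; rw [List.foldl_cons, ih, h]

theorem foldl_step_eq (f g : List (List Int) → Nat → List (List Int))
    (hlen : ∀ m j, (f m j).length = m.length)
    (h : ∀ m j, j < m.length → f m j = g m j) :
    ∀ (l : List Nat) (m : List (List Int)), (∀ j ∈ l, j < m.length) →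
    l.foldl f m = l.foldl g m := by
  intro l
  induction l with
  | nil => intro m _; rfl
  | cons j rest ih =>
    intro m hc
    simp only [List.foldl_cons]
    rw [ih (f m j) (by intro j' hj'; rw [hlen]; exact hc j' (by simp [hj']))]
    rw [h m j (hc j (by simp))]

theorem canon_A (di : List (String × List (String × Int)))
    (hnd : (di.map (·.1)).Nodup) :
    dict_to_matrix di = di.map (fun pr => canonRow (di.map (·.1)) pr.2) := by
  simp only [dict_to_matrix]
  set keys := di.map (·.1) with hkeys
  have hkl : keys.length = di.length := by simp [hkeys]
  simp only [init_rows, List.nil_append]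
  rw [PySem.List.pyRange_zero_nat, List.foldl_map]
  set R : Nat → List Int := fun j => keys.map (fun key =>
      if key ∈ (pyDictVal di (PySem.List.pyGetD keys (j : Int) "") []).map (·.1) then
        pyDictVal (pyDictVal di (PySem.List.pyGetD keys (j : Int) "") []) key 0 else 999) with hR
  rw [foldl_step_eq _ (fun m j => m.set j ((m.getD j []) ++ R j))
      (by intro m j
          apply foldl_preserve_len
          intro m' key
          split_ifs <;> simp)
      (by intro m j hj
          simp only [Int.toNat_natCast]
          rw [inner_fold' _ _ j keys m hj])
      _ _ (by intro j hj; rw [hkl, List.length_replicate]; simpa using hj)]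
  apply List.ext_getElem?
  intro i
  rw [outer_point]
  by_cases h : i < di.length
  · rw [if_pos h, List.getElem?_replicate_of_lt (by omega), List.getElem?_map,
      List.getElem?_eq_getElem h]
    simp only [Option.map_some]
    congr 1
    rw [hR]
    have hget : PySem.List.pyGetD keys (i : Int) "" = keys[i]'(by omega) := by
      rw [PySem.List.pyGetD_eq_getElem keys "" (by positivity) (by omega)]
      simp
    have hfind : pyDictVal di (keys[i]'(by omega)) [] = di[i].2 := by
      unfold pyDictVal
      have : keys[i]'(by omega) = di[i].1 := by simp [hkeys]
      rw [this, find_fst_nodup di hnd i h]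
      rfl
    unfold canonRow
    apply List.map_congr_left
    intro key _
    rw [hget, hfind]
    exact row_entry di[i].2 key
  · rw [if_neg h, List.getElem?_eq_none (by simp; omega), List.getElem?_eq_none (by simp; omega)]

-- ===== VERDICT (by name: the statement is the Claim_ definition above) =====
theorem dict_to_matrix_spec : Claim_equal_dict_to_matrix := by
  intro di _ hpre
  unfold Spec_dict_to_matrix
  rw [canon_A di hpre.1, canon_B di hpre.1 (fun p hp => (hpre.2 p hp).1)]
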